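-- pv_equiv track=rewrite | github.com/phoenix382/hackathon-loto2025-back | app/services/number_generator.py | number_from_hash
-- ===== SOURCE A (Python) =====
-- def number_from_hash(hash_bytes, min_val, max_val):
--     range_size = max_val - min_val + 1
--     max_allowed = (1 << 32) // range_size * range_size
--
--     bit_buffer = 0
--     bit_count = 0
--     byte_index = 0
--
--     while True:
--         while bit_count < 32:
--             bit_buffer = (bit_buffer << 8) | hash_bytes[byte_index]
--             byte_index += 1
--             bit_count += 8
--
--         random_value = (bit_buffer >> (bit_count - 32)) & 0xFFFFFFFF
--         bit_count -= 32
--         bit_buffer &= (1 << bit_count) - 1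
--
--         if random_value < max_allowed:
--             return min_val + (random_value % range_size)
-- ===== SOURCE B (Python) =====
-- def number_from_hash(hash_bytes, min_val, max_val):
--     range_size = max_val - min_val + 1
--     max_allowed = (1 << 32) // range_size * range_size
--     i = 0
--     while True:
--         value = ((hash_bytes[i] << 24) | (hash_bytes[i + 1] << 16)
--                  | (hash_bytes[i + 2] << 8) | hash_bytes[i + 3]) & 0xFFFFFFFF
--         if value < max_allowed:
--             return min_val + value % range_size
--         i += 4
-- ===== Notes on version B (the rewrite author's own statement) =====
-- stated objective: simpler
-- what changed: B removes A's bit_buffer/bit_count state and the inner byte-accumulation loop: each rejection-sampling round reads its 32-bit big-endian word directly from 4 consecutive bytes with explicit left-to-right indexing.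
import Mathlib
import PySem

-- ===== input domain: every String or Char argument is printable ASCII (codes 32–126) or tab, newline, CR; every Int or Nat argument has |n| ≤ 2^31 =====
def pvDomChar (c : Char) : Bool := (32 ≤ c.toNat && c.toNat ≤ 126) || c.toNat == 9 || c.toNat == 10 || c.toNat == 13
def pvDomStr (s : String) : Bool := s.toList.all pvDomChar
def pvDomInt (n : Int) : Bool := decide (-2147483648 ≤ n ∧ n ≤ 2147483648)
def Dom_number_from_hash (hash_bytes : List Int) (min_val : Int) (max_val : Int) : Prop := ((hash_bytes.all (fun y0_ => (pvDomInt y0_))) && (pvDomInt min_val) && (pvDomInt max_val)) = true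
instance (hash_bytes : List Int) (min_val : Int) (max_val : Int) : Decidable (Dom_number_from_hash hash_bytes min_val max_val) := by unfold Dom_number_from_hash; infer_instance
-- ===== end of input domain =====

-- B replaces A's bit-buffer/bit-count inner loop by reading one 32-bit big-endian word per
-- rejection-sampling round directly from 4 consecutive bytes (objective: simpler).

-- ===== PORT A =====
-- inner `while bit_count < 32` loop of A: consumes one byte per step (none = IndexError)
def pvInnerA (hash_bytes : List Int) (bit_buffer : Int) (bit_count : Nat) (byte_index : Nat) :
    Option (Int × Nat × Nat) :=
  if _h : bit_count < 32 then
    match PySem.List.pyGet? hash_bytes (byte_index : Int) with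
    | none => none
    | some b => pvInnerA hash_bytes (PySem.Int.bor (bit_buffer <<< (8 : Nat)) b) (bit_count + 8) (byte_index + 1)
  else some (bit_buffer, bit_count, byte_index)
termination_by 32 - bit_count
decreasing_by omega

-- outer `while True` loop of A; fuel = hash_bytes.length + 1 is enough, since every round
-- consumes at least one byte before it can recurse (none = IndexError)
def pvOuterA (hash_bytes : List Int) (min_val range_size max_allowed : Int) :
    Int → Nat → Nat → Nat → Option Int
  | _, _, _, 0 => none
  | bit_buffer, bit_count, byte_index, fuel + 1 =>
    match pvInnerA hash_bytes bit_buffer bit_count byte_index with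
    | none => none
    | some (buf, cnt, idx) =>
      let random_value := PySem.Int.band (buf >>> (cnt - 32)) 0xFFFFFFFF
      let cnt' := cnt - 32
      let buf' := PySem.Int.band buf ((1 <<< cnt') - 1)
      if random_value < max_allowed then some (min_val + PySem.Int.mod random_value range_size)
      else pvOuterA hash_bytes min_val range_size max_allowed buf' cnt' idx fuel

def number_from_hash (hash_bytes : List Int) (min_val : Int) (max_val : Int) : Int :=
  let range_size := max_val - min_val + 1
  if range_size = 0 then 0   -- ZeroDivisionError in Python; outside Pre_
  else
    let max_allowed := PySem.Int.floordiv (1 <<< (32 : Nat)) range_size * range_size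
    (pvOuterA hash_bytes min_val range_size max_allowed 0 0 0 (hash_bytes.length + 1)).getD 0

-- ===== PORT B =====
-- one rejection round of B: 4 bytes read left to right, one 32-bit word (none = IndexError)
def pvLoopB (hash_bytes : List Int) (min_val range_size max_allowed : Int) : Nat → Nat → Option Int
  | _, 0 => none
  | i, fuel + 1 =>
    match PySem.List.pyGet? hash_bytes (i : Int) with
    | none => none
    | some b0 =>
      match PySem.List.pyGet? hash_bytes ((i + 1 : Nat) : Int) with
      | none => none
      | some b1 =>
        match PySem.List.pyGet? hash_bytes ((i + 2 : Nat) : Int) with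
        | none => none
        | some b2 =>
          match PySem.List.pyGet? hash_bytes ((i + 3 : Nat) : Int) with
          | none => none
          | some b3 =>
            let value := PySem.Int.band
              (PySem.Int.bor (PySem.Int.bor (PySem.Int.bor (b0 <<< (24 : Nat)) (b1 <<< (16 : Nat))) (b2 <<< (8 : Nat))) b3)
              0xFFFFFFFF
            if value < max_allowed then some (min_val + PySem.Int.mod value range_size)
            else pvLoopB hash_bytes min_val range_size max_allowed (i + 4) fuel

def number_from_hash_alt (hash_bytes : List Int) (min_val : Int) (max_val : Int) : Int :=
  let range_size := max_val - min_val + 1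
  if range_size = 0 then 0   -- ZeroDivisionError in Python; outside Pre_
  else
    let max_allowed := PySem.Int.floordiv (1 <<< (32 : Nat)) range_size * range_size
    (pvLoopB hash_bytes min_val range_size max_allowed 0 (hash_bytes.length + 1)).getD 0

-- ===== PRECONDITION & SPEC =====
-- the 32-bit big-endian word taken from bytes 4k .. 4k+3
def pvBlock (hash_bytes : List Int) (k : Nat) : Int :=
  PySem.Int.band
    (PySem.Int.bor (PySem.Int.bor (PySem.Int.bor ((hash_bytes.getD (4 * k) 0) <<< (24 : Nat))
      ((hash_bytes.getD (4 * k + 1) 0) <<< (16 : Nat))) ((hash_bytes.getD (4 * k + 2) 0) <<< (8 : Nat)))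
      (hash_bytes.getD (4 * k + 3) 0))
    0xFFFFFFFF

-- Pre_ excludes exactly the inputs on which Python A raises: range_size = 0 (ZeroDivisionError)
-- and streams with no accepted full 32-bit block (IndexError on exhaustion).
def Pre_number_from_hash (hash_bytes : List Int) (min_val : Int) (max_val : Int) : Prop :=
  max_val - min_val + 1 ≠ 0 ∧
  ∃ k < hash_bytes.length, 4 * k + 3 < hash_bytes.length ∧
    pvBlock hash_bytes k <
      PySem.Int.floordiv (1 <<< (32 : Nat)) (max_val - min_val + 1) * (max_val - min_val + 1)
instance (hash_bytes : List Int) (min_val : Int) (max_val : Int) : Decidable (Pre_number_from_hash hash_bytes min_val max_val) := by unfold Pre_number_from_hash; infer_instance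

def pvWitness_number_from_hash : List Int × Int × Int := ([12, 34, 56, 78], 0, 9)

def Spec_number_from_hash (hash_bytes : List Int) (min_val : Int) (max_val : Int) (out : Int) : Prop := out = number_from_hash_alt hash_bytes min_val max_val
instance (hash_bytes : List Int) (min_val : Int) (max_val : Int) (out : Int) : Decidable (Spec_number_from_hash hash_bytes min_val max_val out) := by unfold Spec_number_from_hash; infer_instance

-- ===== CLAIM (what is proved, stated in full; the proofs are below) =====
def Claim_equal_number_from_hash : Prop := ∀ (hash_bytes : List Int) (min_val : Int) (max_val : Int), Dom_number_from_hash hash_bytes min_val max_val → Pre_number_from_hash hash_bytes min_val max_val → Spec_number_from_hash hash_bytes min_val max_val (number_from_hash hash_bytes min_val max_val)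

-- ===== LEMMAS AND PROOFS =====
lemma pvNatOr (n x y m m' : Nat) (hm : m < 2 ^ n) (hm' : m' < 2 ^ n) :
    (2 ^ n * x + m) ||| (2 ^ n * y + m') = 2 ^ n * (x ||| y) + (m ||| m') := by
  apply Nat.eq_of_testBit_eq; intro j
  rw [Nat.testBit_or, Nat.testBit_two_pow_mul_add _ hm, Nat.testBit_two_pow_mul_add _ hm',
      Nat.testBit_two_pow_mul_add _ (Nat.or_lt_two_pow hm hm')]
  by_cases h : j < n <;> simp [h, Nat.testBit_or]

lemma pvNatAnd (n x y m m' : Nat) (hm : m < 2 ^ n) (hm' : m' < 2 ^ n) :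
    (2 ^ n * x + m) &&& (2 ^ n * y + m') = 2 ^ n * (x &&& y) + (m &&& m') := by
  apply Nat.eq_of_testBit_eq; intro j
  rw [Nat.testBit_and, Nat.testBit_two_pow_mul_add _ hm, Nat.testBit_two_pow_mul_add _ hm',
      Nat.testBit_two_pow_mul_add _ (Nat.lt_of_le_of_lt Nat.and_le_left hm)]
  by_cases h : j < n <;> simp [h, Nat.testBit_and]

lemma pvToNatNeg (b : Int) (hb : b < 0) (n : Nat) :
    (-(b * 2 ^ n) - 1).toNat = 2 ^ n * (-b - 1).toNat + (2 ^ n - 1) := by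
  have h1 : (1 : Nat) ≤ 2 ^ n := Nat.one_le_two_pow
  have hstep : -(b * 2 ^ n) - 1 = ((-b - 1) * 2 ^ n : Int) + (2 ^ n - 1) := by push_cast; ring
  have hb1 : (0 : Int) ≤ -b - 1 := by omega
  have h2 : ((-b - 1) * 2 ^ n : Int) + (2 ^ n - 1) = ((2 ^ n * (-b - 1).toNat + (2 ^ n - 1) : Nat) : Int) := by
    push_cast [Int.toNat_of_nonneg hb1, h1]
    ring
  rw [hstep, h2, Int.toNat_natCast]

lemma pvBorShlMixed (a b : Int) (n : Nat) (ha : 0 ≤ a) (hb : b < 0) :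
    (PySem.Int.bor a b) <<< n = PySem.Int.bor (a <<< n) (b <<< n) := by
  have hs : (0 : Int) < 2 ^ n := by positivity
  have h1 : (1 : Nat) ≤ 2 ^ n := Nat.one_le_two_pow
  have hbn : ¬ (0 ≤ b) := by omega
  have han : 0 ≤ a * 2 ^ n := by positivity
  have hbn2 : ¬ (0 ≤ b * 2 ^ n) := by
    intro h; exact absurd (mul_neg_of_neg_of_pos hb hs) (not_lt.mpr h)
  simp only [Int.shiftLeft_eq, PySem.Int.bor, if_pos ha, if_pos han, if_neg hbn, if_neg hbn2]
  rw [pvToNatNeg b hb n, Int.toNat_mul ha (le_of_lt hs)]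
  have hmask : (2 ^ n - 1 : Nat) < 2 ^ n := by omega
  have htn : ((2 : Int) ^ n).toNat = 2 ^ n := by
    rw [show ((2 : Int) ^ n) = ((2 ^ n : Nat) : Int) by push_cast; ring, Int.toNat_natCast]
  rw [htn, show a.toNat * 2 ^ n = 2 ^ n * a.toNat + 0 by ring,
      pvNatAnd n _ _ _ _ hmask (by omega)]
  rw [Nat.and_zero, Nat.add_zero]
  set K := (-b - 1).toNat &&& a.toNat with hKdef
  set B := (-b - 1).toNat with hBdef
  have hK : K ≤ B := Nat.and_le_left
  have hle : 2 ^ n * K ≤ 2 ^ n * B + (2 ^ n - 1) :=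
    Nat.le_trans (Nat.mul_le_mul_left _ hK) (Nat.le_add_right _ _)
  zify [hK, hle, h1]
  ring

-- Python's `x << n` distributes over `|` on all ints (infinite two's complement)
lemma pvBorShl (a b : Int) (n : Nat) :
    (PySem.Int.bor a b) <<< n = PySem.Int.bor (a <<< n) (b <<< n) := by
  have hs : (0 : Int) < 2 ^ n := by positivity
  have h1 : (1 : Nat) ≤ 2 ^ n := Nat.one_le_two_pow
  rcases (by omega : 0 ≤ a ∨ a < 0) with ha | ha
  · rcases (by omega : 0 ≤ b ∨ b < 0) with hb | hb
    · have han : 0 ≤ a * 2 ^ n := by positivity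
      have hbn : 0 ≤ b * 2 ^ n := by positivity
      have htn : ((2 : Int) ^ n).toNat = 2 ^ n := by
        rw [show ((2 : Int) ^ n) = ((2 ^ n : Nat) : Int) by push_cast; ring, Int.toNat_natCast]
      simp only [Int.shiftLeft_eq, PySem.Int.bor, if_pos ha, if_pos hb, if_pos han, if_pos hbn]
      rw [Int.toNat_mul ha (le_of_lt hs), Int.toNat_mul hb (le_of_lt hs), htn]
      have hor : (a.toNat * 2 ^ n) ||| (b.toNat * 2 ^ n) = (a.toNat ||| b.toNat) * 2 ^ n := by
        simpa [Nat.mul_comm (2 ^ n)] using pvNatOr n a.toNat b.toNat 0 0 (by omega) (by omega)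
      rw [hor]; push_cast; ring
    · exact pvBorShlMixed a b n ha hb
  · rcases (by omega : 0 ≤ b ∨ b < 0) with hb | hb
    · rw [PySem.Int.bor_comm, PySem.Int.bor_comm (a <<< n)]
      exact pvBorShlMixed b a n hb ha
    · have hbn : ¬ (0 ≤ a) := by omega
      have hbn' : ¬ (0 ≤ b) := by omega
      have han2 : ¬ (0 ≤ a * 2 ^ n) := by
        intro h; exact absurd (mul_neg_of_neg_of_pos ha hs) (not_lt.mpr h)
      have hbn2 : ¬ (0 ≤ b * 2 ^ n) := by
        intro h; exact absurd (mul_neg_of_neg_of_pos hb hs) (not_lt.mpr h)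
      simp only [Int.shiftLeft_eq, PySem.Int.bor, if_neg hbn, if_neg hbn', if_neg han2, if_neg hbn2]
      rw [pvToNatNeg a ha n, pvToNatNeg b hb n]
      have hmask : (2 ^ n - 1 : Nat) < 2 ^ n := by omega
      rw [pvNatAnd n _ _ _ _ hmask hmask, Nat.and_self]
      zify [h1]
      ring

-- A's sequential byte accumulation equals B's direct big-endian composition
lemma pvWord_eq (b0 b1 b2 b3 : Int) :
    PySem.Int.bor ((PySem.Int.bor ((PySem.Int.bor ((PySem.Int.bor (0 : Int) b0) <<< (8 : Nat)) b1) <<< (8 : Nat)) b2) <<< (8 : Nat)) b3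
    = PySem.Int.bor (PySem.Int.bor (PySem.Int.bor (b0 <<< (24 : Nat)) (b1 <<< (16 : Nat))) (b2 <<< (8 : Nat))) b3 := by
  rw [show PySem.Int.bor 0 b0 = b0 from by rw [PySem.Int.bor_comm, PySem.Int.bor_zero]]
  simp only [pvBorShl]
  norm_num [Int.shiftLeft_eq, mul_assoc]

lemma pvLoop_eq (hb : List Int) (mn rs ma : Int) :
    ∀ (fuel i : Nat), pvOuterA hb mn rs ma 0 0 i fuel = pvLoopB hb mn rs ma i fuel := by
  intro fuel
  induction fuel with
  | zero => intro i; rfl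
  | succ f ih =>
    intro i
    have e1 : (i : Int) + 1 + 1 = (i : Int) + 2 := by ring
    have e2 : (i : Int) + 2 + 1 = (i : Int) + 3 := by ring
    cases h0 : PySem.List.pyGet? hb ((i : Nat) : Int) with
    | none => simp [pvOuterA, pvLoopB, pvInnerA, h0]
    | some b0 =>
      cases h1 : PySem.List.pyGet? hb ((i : Int) + 1) with
      | none => simp [pvOuterA, pvLoopB, pvInnerA, h0, h1]
      | some b1 =>
        cases h2 : PySem.List.pyGet? hb ((i : Int) + 2) with
        | none => simp [pvOuterA, pvLoopB, pvInnerA, e1, h0, h1, h2]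
        | some b2 =>
          cases h3 : PySem.List.pyGet? hb ((i : Int) + 3) with
          | none => simp [pvOuterA, pvLoopB, pvInnerA, e1, e2, h0, h1, h2, h3]
          | some b3 =>
            have w := pvWord_eq b0 b1 b2 b3
            simp [pvOuterA, pvLoopB, pvInnerA, e1, e2, h0, h1, h2, h3, w, ih]

theorem number_from_hash_spec : Claim_equal_number_from_hash := by
  intro hb mn mx _hdom hpre
  obtain ⟨hrs, -⟩ := hpre
  show number_from_hash hb mn mx = number_from_hash_alt hb mn mx
  simp only [number_from_hash, number_from_hash_alt, if_neg hrs]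
  rw [pvLoop_eq]
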